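-- pv_equiv track=rewrite | github.com/multiscale/muscle3 | libmuscle/python/libmuscle/runner.py | _parse_prefix
-- ===== SOURCE A (Python) =====
-- from typing import Callable, Dict, List, Tuple, cast
--
-- def _parse_prefix(prefix: str) -> Tuple[str, List[int]]:
--     """Parse a --muscle-prefix argument.
--
--     This is like a Reference, but not quite, because the
--     initial identifier may be omitted. That is, [1][2] is
--     also a valid prefix.
--
--     This parses an initial identifier, subsequent identifiers
--     separated by periods, then a list of square-bracketed integers.
--
--     Args:
--         prefix: The prefix to parse.
--
--     Returns:
--         The identifier sequence and the list of ints.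
--     """
--     def parse_identifier(prefix: str, i: int) -> Tuple[str, int]:
--         name = str()
--         while i < len(prefix) and prefix[i] not in '[.':
--             name += prefix[i]
--             i += 1
--         return name, i
--
--     def parse_number(prefix: str, i: int) -> Tuple[int, int]:
--         number = str()
--         while i < len(prefix) and prefix[i] in '0123456789':
--             number += prefix[i]
--             i += 1
--         return int(number), i
--
--     name = str()
--     index = list()  # type: List[int]
--     i = 0
--
--     if i == len(prefix):
--         return name, index
--
--     idt, i = parse_identifier(prefix, i)
--     name += idt
--
--     while i < len(prefix) and prefix[i] == '.':
--         name += '.'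
--         part, i = parse_identifier(prefix, i + 1)
--         name += part
--
--     while i < len(prefix) and prefix[i] == '[':
--         nmb, i = parse_number(prefix, i + 1)
--         index.append(nmb)
--         if prefix[i] != ']':
--             raise ValueError('Missing closing bracket in'
--                              ' --muscle-prefix.')
--         i += 1
--
--     if i < len(prefix):
--         raise ValueError(('Found invalid extra character {} in'
--                           ' --muscle-prefix.').format(prefix[i]))
--
--     return name, index
-- ===== SOURCE B (Python) =====
-- from typing import List, Tuple
--
-- def _parse_prefix(prefix: str) -> Tuple[str, List[int]]:
--     """Parse a --muscle-prefix argument into (name, index list)."""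
--     b = prefix.find('[')
--     if b == -1:
--         return prefix, []
--     index = []  # type: List[int]
--     i = b
--     while i < len(prefix):
--         j = prefix.find(']', i)
--         digits = prefix[i + 1:j]
--         if prefix[i] != '[' or j == -1 or not digits.isdigit():
--             raise ValueError('Invalid bracket syntax in --muscle-prefix.')
--         index.append(int(digits))
--         i = j + 1
--     return prefix[:b], index
-- ===== Notes on version B (the rewrite author's own statement) =====
-- stated objective: faster
-- what changed: A's parse_identifier helper plus the identifier/dot loops (building the name by quadratic char-by-char 'name += prefix[i]' concatenation) are replaced by a single closed-form slice at the first '[' (prefix.find), and the digit-by-digit number loop by one find-the-']' loop that slices out and validates each bracketed group.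
import Mathlib
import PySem

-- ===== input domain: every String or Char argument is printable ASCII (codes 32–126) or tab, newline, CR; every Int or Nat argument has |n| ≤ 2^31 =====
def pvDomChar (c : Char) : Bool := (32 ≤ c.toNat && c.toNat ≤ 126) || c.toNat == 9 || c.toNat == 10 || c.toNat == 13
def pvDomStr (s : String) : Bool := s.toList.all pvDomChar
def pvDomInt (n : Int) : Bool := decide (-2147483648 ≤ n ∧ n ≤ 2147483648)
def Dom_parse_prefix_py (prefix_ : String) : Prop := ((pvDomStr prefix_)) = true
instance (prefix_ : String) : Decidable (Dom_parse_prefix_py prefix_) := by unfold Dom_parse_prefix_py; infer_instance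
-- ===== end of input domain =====

-- B replaces A's identifier/dot nested loops (quadratic char-by-char name building) by a
-- closed-form slice at the first opening bracket and one bracket-group loop (measured faster).
-- Neither version mutates its argument; the equivalence is about the return value.

-- ===== PORT A =====
-- A's character-class tests: `prefix[i] not in '[.'` and `prefix[i] in '0123456789'`
def pvAIdentChar (c : Char) : Bool := !(c == '[' || c == '.')
def pvADigit (c : Char) : Bool := '0' ≤ c && c ≤ '9'

-- `parse_identifier`: consume chars not in '[.', return (name, rest)
def pvAIdent : List Char → List Char × List Char
  | [] => ([], [])
  | c :: rest =>
    if pvAIdentChar c then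
      let nr := pvAIdent rest
      (c :: nr.1, nr.2)
    else ([], c :: rest)

-- `parse_number`: consume chars in '0123456789', return (digits, rest)
def pvANumber : List Char → List Char × List Char
  | [] => ([], [])
  | c :: rest =>
    if pvADigit c then
      let nr := pvANumber rest
      (c :: nr.1, nr.2)
    else ([], c :: rest)

theorem pvAIdent_len (cs : List Char) : (pvAIdent cs).2.length ≤ cs.length := by
  induction cs with
  | nil => simp [pvAIdent]
  | cons c rest ih =>
    simp only [pvAIdent]
    split
    · simpa using Nat.le_succ_of_le ih
    · simp

theorem pvANumber_len (cs : List Char) : (pvANumber cs).2.length ≤ cs.length := by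
  induction cs with
  | nil => simp [pvANumber]
  | cons c rest ih =>
    simp only [pvANumber]
    split
    · simpa using Nat.le_succ_of_le ih
    · simp

-- the `while … prefix[i] == '.'` loop, accumulating the rest of the name
def pvADots : List Char → List Char × List Char
  | [] => ([], [])
  | c :: rest =>
    if c = '.' then
      let pr := pvAIdent rest
      let mr := pvADots pr.2
      ('.' :: (pr.1 ++ mr.1), mr.2)
    else ([], c :: rest)
termination_by cs => cs.length
decreasing_by
  exact Nat.lt_succ_of_le (pvAIdent_len rest)

-- the `while … prefix[i] == '['` loop; int(number) via PySem.Int.ofChars?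
-- (on the paths where A raises — int('') or a missing ']' — the port returns a junk
-- value; those inputs are outside Pre_)
def pvABrackets : List Char → List Int × List Char
  | [] => ([], [])
  | c :: rest =>
    if c = '[' then
      let nr := pvANumber rest
      let n := (PySem.Int.ofChars? nr.1).getD 0
      match h : nr.2 with
      | ']' :: r' =>
        let ir := pvABrackets r'
        (n :: ir.1, ir.2)
      | _ => ([n], nr.2)
    else ([], c :: rest)
termination_by cs => cs.length
decreasing_by
  have := pvANumber_len rest
  rw [h] at this
  simp only [List.length_cons] at this ⊢
  omega

def parse_prefix_py (prefix_ : String) : String × List Int :=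
  let cs := prefix_.toList
  if cs = [] then ("", [])
  else
    let ir := pvAIdent cs
    let dr := pvADots ir.2
    let br := pvABrackets dr.2
    -- `if i < len(prefix): raise` — br.2 ≠ [] is outside Pre_
    (String.ofList (ir.1 ++ dr.1), br.1)

-- ===== PORT B =====
-- `prefix.find(']', i)` + the two slices it induces: split at the first ']'
def pvBSplit : List Char → Option (List Char × List Char)
  | [] => none
  | c :: rest =>
    if c = ']' then some ([], rest)
    else
      match pvBSplit rest with
      | some ab => some (c :: ab.1, ab.2)
      | none => none

theorem pvBSplit_len (cs a b : List Char) (h : pvBSplit cs = some (a, b)) :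
    b.length < cs.length := by
  induction cs generalizing a b with
  | nil => simp [pvBSplit] at h
  | cons c rest ih =>
    simp only [pvBSplit] at h
    split at h
    · cases h; simp
    · cases hsplit : pvBSplit rest with
      | none => rw [hsplit] at h; cases h
      | some ab =>
        rw [hsplit] at h
        cases h
        exact Nat.lt_succ_of_lt (ih ab.1 ab.2 (by rw [hsplit]))

-- B's `while i < len(prefix)` loop over the bracket groups (error paths return junk)
def pvBGroups : List Char → List Int
  | [] => []
  | c :: rest =>
    match h : pvBSplit rest with
    | some dsr =>
      if c = '[' && PySem.Chars.strIsdigit dsr.1 then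
        ((PySem.Int.ofChars? dsr.1).getD 0) :: pvBGroups dsr.2
      else []
    | none => []
termination_by cs => cs.length
decreasing_by
  exact Nat.lt_succ_of_lt (pvBSplit_len rest dsr.1 dsr.2 h)

def parse_prefix_py_alt (prefix_ : String) : String × List Int :=
  let cs := prefix_.toList
  -- b = prefix.find('['): name = prefix[:b], rest = prefix[b:]
  let name := cs.takeWhile (fun c => !(c == '['))
  let rest := cs.dropWhile (fun c => !(c == '['))
  if rest = [] then (prefix_, [])
  else (String.ofList name, pvBGroups rest)

-- ===== PRECONDITION & SPEC =====
-- Pre_ excludes exactly the inputs on which A raises (ValueError from int('') or a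
-- missing ']' or an extra character after the groups, IndexError on an unterminated
-- number): after the first '[' the string must be a sequence of non-empty bracketed
-- digit groups '[d…d]' reaching the end of the string — a DFA over the suffix
-- (state 0: at a group boundary; 1: just after '['; 2: inside a digit run).
def pvGOK : List Char → Nat → Bool
  | [], st => st == 0
  | c :: rest, 0 => if c = '[' then pvGOK rest 1 else false
  | c :: rest, 1 => if pvADigit c then pvGOK rest 2 else false
  | c :: rest, _ => if pvADigit c then pvGOK rest 2
                    else if c = ']' then pvGOK rest 0 else false

def Pre_parse_prefix_py (prefix_ : String) : Prop :=
  pvGOK (prefix_.toList.dropWhile (fun c => !(c == '['))) 0 = true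
instance (prefix_ : String) : Decidable (Pre_parse_prefix_py prefix_) := by
  unfold Pre_parse_prefix_py; infer_instance

def pvWitness_parse_prefix_py : String := "macro.meso[3][14]"

def Spec_parse_prefix_py (prefix_ : String) (out : String × List Int) : Prop := out = parse_prefix_py_alt prefix_
instance (prefix_ : String) (out : String × List Int) : Decidable (Spec_parse_prefix_py prefix_ out) := by unfold Spec_parse_prefix_py; infer_instance

-- ===== CLAIM (what is proved, stated in full; the proofs are below) =====
def Claim_equal_parse_prefix_py : Prop := ∀ (prefix_ : String), Dom_parse_prefix_py prefix_ → Pre_parse_prefix_py prefix_ → Spec_parse_prefix_py prefix_ (parse_prefix_py prefix_)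

-- ===== LEMMAS AND PROOFS =====

theorem pvAIdent_spec (cs : List Char) :
    pvAIdent cs = (cs.takeWhile pvAIdentChar, cs.dropWhile pvAIdentChar) := by
  induction cs with
  | nil => simp [pvAIdent]
  | cons c rest ih =>
    simp only [pvAIdent, List.takeWhile, List.dropWhile]
    cases hc : pvAIdentChar c <;> simp [hc, ih]

theorem pvTakeWhile_app {q : Char → Bool} (t l : List Char) (h : ∀ c ∈ t, q c = true) :
    (t ++ l).takeWhile q = t ++ l.takeWhile q := by
  induction t with
  | nil => simp
  | cons c t ih =>
    have hc : q c = true := h c (by simp)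
    simp only [List.cons_append, List.takeWhile_cons, hc, if_true]
    rw [ih (fun c hc' => h c (by simp [hc']))]

theorem pvDropWhile_app {q : Char → Bool} (t l : List Char) (h : ∀ c ∈ t, q c = true) :
    (t ++ l).dropWhile q = l.dropWhile q := by
  induction t with
  | nil => simp
  | cons c t ih =>
    have hc : q c = true := h c (by simp)
    simp only [List.cons_append, List.dropWhile_cons, hc, if_true]
    exact ih (fun c hc' => h c (by simp [hc']))

theorem pvDropWhile_head {q : Char → Bool} (cs : List Char) (c : Char) (r : List Char)
    (h : cs.dropWhile q = c :: r) : q c = false := by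
  induction cs with
  | nil => simp [List.dropWhile] at h
  | cons d rest ih =>
    simp only [List.dropWhile] at h
    cases hd : q d
    · rw [hd] at h; simp at h; rw [← h.1]; exact hd
    · rw [hd] at h; simp at h; exact ih h

-- the name/dots phase of A computes prefix[:find('[')] and leaves prefix[find('['):]
theorem pvName_spec (cs : List Char) :
    (pvAIdent cs).1 ++ (pvADots (pvAIdent cs).2).1 = cs.takeWhile (fun c => !(c == '[')) ∧
    (pvADots (pvAIdent cs).2).2 = cs.dropWhile (fun c => !(c == '[')) := by
  induction hn : cs.length using Nat.strong_induction_on generalizing cs with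
  | _ n ih =>
  rw [pvAIdent_spec]
  have hall : ∀ c ∈ cs.takeWhile pvAIdentChar, (!(c == '[')) = true := by
    intro c hc
    have := List.mem_takeWhile_imp hc
    simp [pvAIdentChar] at this
    simp [this.1]
  have hsplit : cs = cs.takeWhile pvAIdentChar ++ cs.dropWhile pvAIdentChar :=
    (List.takeWhile_append_dropWhile).symm
  cases hdrop : cs.dropWhile pvAIdentChar with
  | nil =>
    have hdots : pvADots ([] : List Char) = ([], []) := by simp [pvADots]
    dsimp only
    rw [hdots]
    refine ⟨?_, ?_⟩
    · rw [List.append_nil]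
      conv_rhs => rw [hsplit, hdrop, List.append_nil]
      exact (List.takeWhile_eq_self_iff.mpr hall).symm
    · conv_rhs => rw [hsplit, hdrop, List.append_nil]
      exact (List.dropWhile_eq_nil_iff.mpr hall).symm
  | cons c r =>
    have hc : pvAIdentChar c = false := pvDropWhile_head cs c r hdrop
    have hc' : c = '[' ∨ c = '.' := by
      simp [pvAIdentChar] at hc
      tauto
    rcases hc' with hcb | hcd
    · subst hcb
      have hdots : pvADots ('[' :: r) = ([], '[' :: r) := by simp [pvADots]
      dsimp only
      rw [hdots]
      refine ⟨?_, ?_⟩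
      · rw [List.append_nil]
        conv_rhs => rw [hsplit, hdrop, pvTakeWhile_app _ _ hall]
        simp
      · conv_rhs => rw [hsplit, hdrop, pvDropWhile_app _ _ hall]
        simp
    · subst hcd
      have hrlen : r.length < n := by
        subst hn
        have := List.length_dropWhile_le (p := pvAIdentChar) (l := cs)
        rw [hdrop] at this; simp at this; omega
      have ihr := ih r.length hrlen r rfl
      rw [pvAIdent_spec] at ihr
      have hdots : pvADots ('.' :: r) =
          ('.' :: ((pvAIdent r).1 ++ (pvADots (pvAIdent r).2).1), (pvADots (pvAIdent r).2).2) := by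
        simp [pvADots]
      rw [pvAIdent_spec] at hdots
      dsimp only
      rw [hdots]
      refine ⟨?_, ?_⟩
      · conv_rhs => rw [hsplit, hdrop, pvTakeWhile_app _ _ hall]
        rw [ihr.1]
        simp [List.takeWhile_cons]
      · conv_rhs => rw [hsplit, hdrop, pvDropWhile_app _ _ hall]
        rw [ihr.2]
        simp [List.dropWhile_cons]

theorem pvBSplit_app (a b : List Char) (h : ∀ c ∈ a, c ≠ ']') :
    pvBSplit (a ++ ']' :: b) = some (a, b) := by
  induction a with
  | nil => simp [pvBSplit]
  | cons c a ih =>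
    have hc : c ≠ ']' := h c (by simp)
    simp only [List.cons_append, pvBSplit, if_neg hc]
    rw [ih (fun c hc' => h c (by simp [hc']))]

theorem pvANumber_app (ds r : List Char) (h : ∀ c ∈ ds, pvADigit c = true) :
    pvANumber (ds ++ ']' :: r) = (ds, ']' :: r) := by
  induction ds with
  | nil => simp [pvANumber, pvADigit]
  | cons c ds ih =>
    have hc : pvADigit c = true := h c (by simp)
    simp only [List.cons_append, pvANumber, hc, if_true]
    rw [ih (fun c hc' => h c (by simp [hc']))]

-- a string accepted in DFA state 2 splits as digits ++ ']' ++ an accepted suffix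
theorem pvGOK_two (cs : List Char) (h : pvGOK cs 2 = true) :
    ∃ ds r', cs = ds ++ ']' :: r' ∧ (∀ c ∈ ds, pvADigit c = true) ∧ pvGOK r' 0 = true := by
  induction cs with
  | nil => simp [pvGOK] at h
  | cons c rest ih =>
    simp only [pvGOK] at h
    by_cases hd : pvADigit c = true
    · rw [if_pos hd] at h
      obtain ⟨ds, r', he, hds, hok⟩ := ih h
      exact ⟨c :: ds, r', by simp [he], by
        intro x hx; rcases List.mem_cons.mp hx with hx | hx
        · subst hx; exact hd
        · exact hds x hx, hok⟩
    · rw [if_neg hd] at h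
      by_cases hb : c = ']'
      · subst hb
        rw [if_pos rfl] at h
        exact ⟨[], rest, by simp, by simp, h⟩
      · rw [if_neg hb] at h
        cases h

-- under Pre_, A's bracket loop and B's group loop compute the same list and A
-- consumes the whole string
theorem pvBrackets_spec (cs : List Char) (h : pvGOK cs 0 = true) :
    pvABrackets cs = (pvBGroups cs, []) := by
  induction hn : cs.length using Nat.strong_induction_on generalizing cs with
  | _ n ih =>
  cases cs with
  | nil => simp [pvABrackets, pvBGroups]
  | cons c rest =>
    simp only [pvGOK] at h
    split at h
    case isFalse => cases h
    case isTrue hc =>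
    subst hc
    -- state 1: first char after '[' is a digit, then state 2
    cases rest with
    | nil => simp [pvGOK] at h
    | cons d rest' =>
      simp only [pvGOK] at h
      split at h
      case isFalse => cases h
      case isTrue hd =>
      obtain ⟨ds, r', he, hds, hok⟩ := pvGOK_two rest' h
      subst he
      have hds' : ∀ c ∈ d :: ds, pvADigit c = true := by
        intro x hx; rcases List.mem_cons.mp hx with hx | hx
        · subst hx; exact hd
        · exact hds x hx
      have hrest : d :: (ds ++ ']' :: r') = (d :: ds) ++ ']' :: r' := rfl
      have hnum : pvANumber (d :: (ds ++ ']' :: r')) = (d :: ds, ']' :: r') := by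
        rw [hrest]; exact pvANumber_app _ _ hds'
      have hnotb : ∀ c ∈ d :: ds, c ≠ ']' := by
        intro x hx hxb
        have := hds' x hx
        subst hxb
        simp [pvADigit] at this
      have hbs : pvBSplit (d :: (ds ++ ']' :: r')) = some (d :: ds, r') := by
        rw [hrest]; exact pvBSplit_app _ _ hnotb
      have hdig : PySem.Chars.strIsdigit (d :: ds) = true := by
        have hall : ∀ x ∈ d :: ds, PySem.Chars.isdigit x = true := hds'
        simp only [PySem.Chars.strIsdigit, List.all_eq_true, List.isEmpty_cons, Bool.not_false,
          Bool.true_and]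
        exact hall
      have hrlen : r'.length < n := by
        subst hn
        simp only [List.length_cons, List.length_append]
        omega
      have ihr := ih r'.length hrlen r' hok rfl
      simp only [pvABrackets, pvBGroups, if_pos rfl]
      rw [hnum, hbs]
      simp [hdig, ihr]

-- ===== VERDICT (by name: the statement is the Claim_ definition above) =====
theorem parse_prefix_py_spec : Claim_equal_parse_prefix_py := by
  intro prefix_ _hdom hpre
  unfold Spec_parse_prefix_py parse_prefix_py parse_prefix_py_alt
  unfold Pre_parse_prefix_py at hpre
  have hname := pvName_spec prefix_.toList
  by_cases hnil : prefix_.toList = []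
  · have hofl : String.ofList prefix_.toList = prefix_ := String.ofList_toList
    have hp : prefix_ = "" := by rw [← hofl, hnil]
    subst hp
    rfl
  · dsimp only
    rw [if_neg hnil]
    by_cases hrest : prefix_.toList.dropWhile (fun c => !(c == '[')) = []
    · -- no '[' in the string: A's bracket loop gets [], B returns prefix_ itself
      rw [if_pos hrest]
      have hofl : String.ofList prefix_.toList = prefix_ := String.ofList_toList
      have h2 := hname.2
      rw [hrest] at h2
      have hbr : pvABrackets (pvADots (pvAIdent prefix_.toList).2).2 = ([], []) := by
        rw [h2]; simp [pvABrackets]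
      rw [hbr]
      have htake : prefix_.toList.takeWhile (fun c => !(c == '[')) = prefix_.toList := by
        rw [List.takeWhile_eq_self_iff]
        intro c hc
        by_contra hcb
        simp only [Bool.not_eq_true, Bool.not_eq_false', beq_iff_eq] at hcb
        subst hcb
        rw [List.dropWhile_eq_nil_iff] at hrest
        have := hrest '[' hc
        simp at this
      rw [hname.1, htake, hofl]
    · rw [if_neg hrest]
      rw [hname.1, hname.2, pvBrackets_spec _ hpre]
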